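-- pv_equiv track=rewrite | github.com/daonm/lotto | lotto-prediction/backend/utils.py | has_consecutive_numbers
-- ===== SOURCE A (Python) =====
-- def has_consecutive_numbers(numbers, max_consecutive=3):
--     """
--     연속된 번호가 max_consecutive개 이상 있는지 확인합니다.
--
--     Args:
--         numbers: 번호 리스트
--         max_consecutive: 최대 허용 연속 개수
--
--     Returns:
--         True: 연속 번호가 있음, False: 없음
--     """
--     sorted_nums = sorted(numbers)
--     consecutive_count = 1
--
--     for i in range(1, len(sorted_nums)):
--         if sorted_nums[i] == sorted_nums[i-1] + 1:
--             consecutive_count += 1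
--             if consecutive_count >= max_consecutive:
--                 return True
--         else:
--             consecutive_count = 1
--
--     return False
-- ===== SOURCE B (Python) =====
-- def has_consecutive_numbers(numbers, max_consecutive=3):
--     """Set-based run detection: for each run start (n with n-1 absent),
--     walk the run upward by membership and compare its length."""
--     pool = set(numbers)
--     for n in pool:
--         if n - 1 in pool:
--             continue  # not the start of a run
--         length = 1
--         while n + length in pool:
--             length += 1
--         if length >= max_consecutive:
--             return True
--     return False
-- ===== Notes on version B (the rewrite author's own statement) =====
-- stated objective: alternative
-- what changed: Replaces sort-then-scan-with-reset-counter by set-based run detection (hash the numbers, walk each run upward from its start n with n-1 absent); Pre_ excludes lists with repeated numbers, where A's reset-on-duplicate and B's set semantics are two equally defensible readings of 'run of consecutive numbers'.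
-- intended difference: For max_consecutive <= 1 on a nonempty duplicate-free list containing no two adjacent integers, A returns False although any nonempty list trivially contains a run of length 1 (A's threshold check only fires after an increment), while B returns True, the intended value. — e.g. on has_consecutive_numbers([5], 1): A returns false, B returns true
-- outside the precondition, e.g. on has_consecutive_numbers([1, 2, 2, 3], 3): A returns False, B returns True
import Mathlib
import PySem

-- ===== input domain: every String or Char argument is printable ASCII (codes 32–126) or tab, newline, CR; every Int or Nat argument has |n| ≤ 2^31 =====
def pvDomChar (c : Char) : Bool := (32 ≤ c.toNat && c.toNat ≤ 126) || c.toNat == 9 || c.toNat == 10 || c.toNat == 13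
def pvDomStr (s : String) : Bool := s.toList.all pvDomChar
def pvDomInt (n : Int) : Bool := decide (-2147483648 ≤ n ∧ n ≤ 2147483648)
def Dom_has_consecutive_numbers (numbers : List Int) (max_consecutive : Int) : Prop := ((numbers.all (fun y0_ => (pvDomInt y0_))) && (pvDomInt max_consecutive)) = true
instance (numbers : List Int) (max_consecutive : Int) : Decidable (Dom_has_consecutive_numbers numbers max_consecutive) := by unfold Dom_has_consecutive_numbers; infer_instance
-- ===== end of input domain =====

-- B replaces A's sort-then-scan counter by set-based run detection (hash membership,
-- walk each run upward from its start); equivalence is proved on duplicate-free lists.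

-- ===== PORT A =====
-- the for-loop over range(1, len) compares sorted_nums[i] with sorted_nums[i-1]: rendered as the
-- obvious structural recursion carrying the previous element and the running counter (same state)
def hcnLoopA (maxc : Int) : Int → Int → List Int → Bool
  | _prev, _count, [] => false
  | prev, count, x :: rest =>
    if x = prev + 1 then
      if count + 1 ≥ maxc then true else hcnLoopA maxc x (count + 1) rest
    else hcnLoopA maxc x 1 rest

def has_consecutive_numbers (numbers : List Int) (max_consecutive : Int) : Bool :=
  match PySem.List.sorted numbers (fun x => x) false with
  | [] => false
  | h :: t => hcnLoopA max_consecutive h 1 t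

-- ===== PORT B =====
-- the 'while n + length in pool' loop; fuel = pool.length is a totality guard only:
-- the walked values n+1, n+2, … are distinct members of the duplicate-free pool,
-- so the loop stops within pool.length steps, exactly as the Python while loop does
def hcnRunLen (pool : List Int) (n : Int) : Nat → Int → Int
  | 0, len => len
  | fuel + 1, len =>
    if PySem.Set.contains pool (n + len) then hcnRunLen pool n fuel (len + 1) else len

-- the for-loop over the set returns True on the first run start whose run is long enough:
-- an existence check, independent of the set's iteration order, rendered as List.any
def has_consecutive_numbers_alt (numbers : List Int) (max_consecutive : Int) : Bool :=
  let pool : PySem.Set Int := PySem.Set.ofList numbers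
  pool.any (fun n =>
    !(PySem.Set.contains pool (n - 1)) &&
      decide (max_consecutive ≤ hcnRunLen pool n pool.length 1))

-- ===== PRECONDITION & SPEC =====
-- Pre_ excludes lists with repeated numbers: there A's duplicate-reset (a duplicate breaks a
-- run) and B's set semantics (duplicates are irrelevant) are two equally defensible readings.
def Pre_has_consecutive_numbers (numbers : List Int) (max_consecutive : Int) : Prop :=
  numbers.Nodup
instance (numbers : List Int) (max_consecutive : Int) : Decidable (Pre_has_consecutive_numbers numbers max_consecutive) := by unfold Pre_has_consecutive_numbers; infer_instance

def pvWitness_has_consecutive_numbers : List Int × Int := ([1, 2, 3, 7], 3)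

-- For max_consecutive ≤ 1 on a nonempty list with no two adjacent integers, A returns False
-- although any nonempty list trivially contains a run of length 1 (A's threshold check only
-- fires after an increment), while B returns True, the intended value.
def D_has_consecutive_numbers (numbers : List Int) (max_consecutive : Int) : Prop :=
  max_consecutive ≤ 1 ∧ numbers ≠ [] ∧ ∀ x ∈ numbers, x + 1 ∉ numbers
instance (numbers : List Int) (max_consecutive : Int) : Decidable (D_has_consecutive_numbers numbers max_consecutive) := by unfold D_has_consecutive_numbers; infer_instance

def Spec_has_consecutive_numbers (numbers : List Int) (max_consecutive : Int) (out : Bool) : Prop := ¬ D_has_consecutive_numbers numbers max_consecutive → out = has_consecutive_numbers_alt numbers max_consecutive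
instance (numbers : List Int) (max_consecutive : Int) (out : Bool) : Decidable (Spec_has_consecutive_numbers numbers max_consecutive out) := by unfold Spec_has_consecutive_numbers; infer_instance

def pvDiffWitness_has_consecutive_numbers : List Int × Int := ([5], 1)
def pvDiffWitnessOut_has_consecutive_numbers : Bool × Bool := (false, true)

-- ===== CLAIM (what is proved, stated in full; the proofs are below) =====
def Claim_unchanged_has_consecutive_numbers : Prop := ∀ (numbers : List Int) (max_consecutive : Int), Dom_has_consecutive_numbers numbers max_consecutive → Pre_has_consecutive_numbers numbers max_consecutive → Spec_has_consecutive_numbers numbers max_consecutive (has_consecutive_numbers numbers max_consecutive)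
def Claim_changed_has_consecutive_numbers : Prop := Dom_has_consecutive_numbers (pvDiffWitness_has_consecutive_numbers.1) (pvDiffWitness_has_consecutive_numbers.2) ∧ Pre_has_consecutive_numbers (pvDiffWitness_has_consecutive_numbers.1) (pvDiffWitness_has_consecutive_numbers.2) ∧ D_has_consecutive_numbers (pvDiffWitness_has_consecutive_numbers.1) (pvDiffWitness_has_consecutive_numbers.2) ∧ has_consecutive_numbers (pvDiffWitness_has_consecutive_numbers.1) (pvDiffWitness_has_consecutive_numbers.2) = pvDiffWitnessOut_has_consecutive_numbers.1 ∧ has_consecutive_numbers_alt (pvDiffWitness_has_consecutive_numbers.1) (pvDiffWitness_has_consecutive_numbers.2) = pvDiffWitnessOut_has_consecutive_numbers.2 ∧ pvDiffWitnessOut_has_consecutive_numbers.1 ≠ pvDiffWitnessOut_has_consecutive_numbers.2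
def Claim_exact_has_consecutive_numbers : Prop := ∀ (numbers : List Int) (max_consecutive : Int), Dom_has_consecutive_numbers numbers max_consecutive → Pre_has_consecutive_numbers numbers max_consecutive → D_has_consecutive_numbers numbers max_consecutive → has_consecutive_numbers numbers max_consecutive ≠ has_consecutive_numbers_alt numbers max_consecutive

-- ===== LEMMAS AND PROOFS =====

-- a run of m consecutive integers starting at n, by membership
def RunP (l : List Int) (n m : Int) : Prop := ∀ k : Int, 0 ≤ k → k < m → (n + k) ∈ l
def HasRun (l : List Int) (m : Int) : Prop := ∃ n, n ∈ l ∧ RunP l n m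

theorem hasRun_mono {l l' : List Int} {m : Int} (hsub : ∀ x : Int, x ∈ l → x ∈ l')
    (h : HasRun l m) : HasRun l' m := by
  obtain ⟨n, hn, hr⟩ := h
  exact ⟨n, hsub n hn, fun k h0 hk => hsub _ (hr k h0 hk)⟩

-- k distinct integers a, a+1, …, a+(k-1) all lying in a duplicate-free list bound its length
theorem distinct_run_le_length (pool : List Int) (_hnd : pool.Nodup) (a : Int) (k : Nat)
    (h : ∀ i : Nat, i < k → a + (i : Int) ∈ pool) : k ≤ pool.length := by
  have hinj : Function.Injective (fun i : Nat => a + (i : Int)) := by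
    intro i j hij; simp only at hij; omega
  have hnd' : ((List.range k).map (fun i : Nat => a + (i : Int))).Nodup :=
    (List.nodup_range).map hinj
  have hsub : ((List.range k).map (fun i : Nat => a + (i : Int))) ⊆ pool := by
    intro x hx
    obtain ⟨i, hi, rfl⟩ := List.mem_map.mp hx
    exact h i (List.mem_range.mp hi)
  have := (List.subperm_of_subset hnd' hsub).length_le
  simpa using this

-- ----- B-side: properties of the run-length while loop -----

theorem runLen_ge (pool : List Int) (n : Int) : ∀ (fuel : Nat) (len : Int),
    len ≤ hcnRunLen pool n fuel len := by
  intro fuel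
  induction fuel with
  | zero => intro len; simp [hcnRunLen]
  | succ f ih =>
    intro len
    simp only [hcnRunLen]
    split
    · exact le_trans (by omega) (ih (len + 1))
    · exact le_refl len

theorem runLen_mem (pool : List Int) (n : Int) : ∀ (fuel : Nat) (len i : Int),
    len ≤ i → i < hcnRunLen pool n fuel len → n + i ∈ pool := by
  intro fuel
  induction fuel with
  | zero =>
    intro len i h1 h2
    simp only [hcnRunLen] at h2
    omega
  | succ f ih =>
    intro len i h1 h2
    simp only [hcnRunLen] at h2
    by_cases hc : PySem.Set.contains pool (n + len) = true
    · rw [if_pos hc] at h2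
      rcases eq_or_lt_of_le h1 with rfl | hlt
      · exact (PySem.Set.contains_iff pool _).mp hc
      · exact ih (len + 1) i (by omega) h2
    · rw [if_neg hc] at h2; omega

theorem runLen_lower (pool : List Int) (n : Int) : ∀ (fuel : Nat) (len L : Int),
    L ≤ len + (fuel : Int) → (∀ i : Int, len ≤ i → i < L → n + i ∈ pool) →
    L ≤ hcnRunLen pool n fuel len := by
  intro fuel
  induction fuel with
  | zero =>
    intro len L h1 _
    simp only [hcnRunLen]
    omega
  | succ f ih =>
    intro len L h1 h2
    by_cases hL : L ≤ len
    · exact le_trans hL (runLen_ge pool n _ len)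
    · have hmem : n + len ∈ pool := h2 len (le_refl len) (by omega)
      have hc : PySem.Set.contains pool (n + len) = true :=
        (PySem.Set.contains_iff pool (n + len)).mpr hmem
      simp only [hcnRunLen, if_pos hc]
      exact ih (len + 1) L (by push_cast at h1 ⊢; omega)
        (fun i hi hiL => h2 i (by omega) hiL)

-- from any member one can descend to the start of its run (pool duplicate-free)
theorem exists_start (pool : List Int) (hnd : pool.Nodup) (n₀ : Int) (h0 : n₀ ∈ pool) :
    ∃ st : Int, st ∈ pool ∧ st - 1 ∉ pool ∧ 0 ≤ n₀ - st ∧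
      ∀ i : Int, 0 ≤ i → i ≤ n₀ - st → st + i ∈ pool := by
  classical
  set P : Nat → Prop := fun j => ∀ i : Nat, i ≤ j → n₀ - (i : Int) ∈ pool with hPdef
  have hP0 : P 0 := by
    intro i hi
    have : i = 0 := by omega
    subst this
    simpa using h0
  set b := pool.length with hb
  set j := Nat.findGreatest P b with hj
  have hPj : P j := Nat.findGreatest_spec (Nat.zero_le b) hP0
  have hjle : j ≤ b := hj ▸ Nat.findGreatest_le b
  refine ⟨n₀ - (j : Int), hPj j (le_refl j), ?_, by omega, ?_⟩
  · intro hmem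
    have hPsucc : P (j + 1) := by
      intro i hi
      rcases Nat.eq_or_lt_of_le hi with rfl | hlt
      · have h2 : n₀ - (j : Int) - 1 ∈ pool := hmem
        have hcast : n₀ - ((j + 1 : Nat) : Int) = n₀ - (j : Int) - 1 := by push_cast; ring
        rw [hcast]
        exact h2
      · exact hPj i (by omega)
    rcases Nat.lt_or_ge j b with hjb | hjb
    · exact Nat.findGreatest_is_greatest (n := b) (by omega) (by omega) hPsucc
    · -- j = b: the b+1 values n₀-b, …, n₀ are distinct members of pool, of length b
      have hjb' : j = b := le_antisymm hjle hjb
      have hPb : P b := hjb' ▸ hPj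
      have hlen : b + 1 ≤ pool.length := by
        apply distinct_run_le_length pool hnd (n₀ - (b : Int)) (b + 1)
        intro i hi
        have hm := hPb (b - i) (Nat.sub_le b i)
        have hcast : n₀ - (b : Int) + (i : Int) = n₀ - ((b - i : Nat) : Int) := by omega
        rw [hcast]
        exact hm
      omega
  · intro i h0i hi
    have hm := hPj (((j : Int) - i).toNat) (by omega)
    have hcast : n₀ - (j : Int) + i = n₀ - ((((j : Int) - i).toNat : Nat) : Int) := by omega
    rw [hcast]
    exact hm

-- B's value characterised: a run of max(maxc,2) consecutive members exists (outside D_)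
theorem B_char (numbers : List Int) (maxc : Int) (hnd : numbers.Nodup)
    (hnD : ¬ D_has_consecutive_numbers numbers maxc) :
    (has_consecutive_numbers_alt numbers maxc = true ↔ HasRun numbers (max maxc 2)) := by
  classical
  unfold has_consecutive_numbers_alt
  simp only [List.any_eq_true, Bool.and_eq_true, Bool.not_eq_true', decide_eq_true_eq]
  have hmem : ∀ x : Int, x ∈ PySem.Set.ofList numbers ↔ x ∈ numbers := by
    intro x; exact PySem.Set.mem_ofList numbers x
  have hpnd : (PySem.Set.ofList numbers).Nodup := PySem.Set.nodup_ofList numbers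
  constructor
  · rintro ⟨n, hn, hstart, hlen⟩
    have hnmem : n ∈ numbers := (hmem n).mp hn
    rcases le_or_gt maxc 1 with hm1 | hm2
    · -- maxc ≤ 1: ¬D_ forces an adjacent pair somewhere
      have hne : numbers ≠ [] := by intro h; subst h; simp at hnmem
      have : ¬ ∀ x ∈ numbers, x + 1 ∉ numbers := fun h => hnD ⟨hm1, hne, h⟩
      push Not at this
      obtain ⟨x, hx, hx1⟩ := this
      refine ⟨x, hx, fun k h0 hk => ?_⟩
      have hmax : max maxc 2 = 2 := by omega
      rw [hmax] at hk
      interval_cases k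
      · simpa using hx
      · simpa using hx1
    · have hmax : max maxc 2 = maxc := by omega
      rw [hmax]
      refine ⟨n, hnmem, fun k h0 hk => ?_⟩
      rcases eq_or_lt_of_le h0 with rfl | hpos
      · simpa using hnmem
      · have : n + k ∈ PySem.Set.ofList numbers :=
          runLen_mem _ n (PySem.Set.ofList numbers).length 1 k (by omega) (by omega)
        exact (hmem _).mp this
  · rintro ⟨n₀, hn₀, hrun⟩
    have hn₀p : n₀ ∈ PySem.Set.ofList numbers := (hmem n₀).mpr hn₀
    obtain ⟨st, hst, hst1, hstle, hstrun⟩ := exists_start _ hpnd n₀ hn₀p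
    refine ⟨st, hst, by simpa using hst1, ?_⟩
    -- every value st, st+1, …, st+(n₀-st)+(max maxc 2 - 1) is in the pool
    have hall : ∀ i : Int, 0 ≤ i → i ≤ (n₀ - st) + (max maxc 2 - 1) →
        st + i ∈ PySem.Set.ofList numbers := by
      intro i h0i hi
      rcases le_or_gt i (n₀ - st) with hle | hgt
      · exact hstrun i h0i hle
      · have : st + i = n₀ + (i - (n₀ - st)) := by ring
        rw [this]
        exact (hmem _).mpr (hrun (i - (n₀ - st)) (by omega) (by omega))
    rcases le_or_gt maxc 1 with hm1 | hm2
    · exact le_trans hm1 (runLen_ge _ st (PySem.Set.ofList numbers).length 1)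
    · -- maxc ≥ 2: maxc distinct values st..st+maxc-1 lie in the pool, bounding the fuel
      have hfuel : maxc ≤ 1 + ((PySem.Set.ofList numbers).length : Int) := by
        have : maxc.toNat ≤ (PySem.Set.ofList numbers).length := by
          apply distinct_run_le_length _ hpnd st
          intro i hi
          exact hall i (by omega) (by omega)
        omega
      apply runLen_lower _ st (PySem.Set.ofList numbers).length 1 maxc (by omega)
      intro i hi hiL
      exact hall i (by omega) (by omega)

-- ----- A-side: the scan over the strictly increasing sorted list -----

theorem loopA_iff (maxc : Int) : ∀ (t : List Int) (prev c : Int), 1 ≤ c →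
    List.Pairwise (· < ·) (prev :: t) →
    (hcnLoopA maxc prev c t = true ↔
      (∃ f : Int, 1 ≤ f ∧ maxc ≤ c + f ∧ ∀ i : Int, 1 ≤ i → i ≤ f → prev + i ∈ t)
      ∨ HasRun t (max maxc 2)) := by
  intro t
  induction t with
  | nil =>
    intro prev c hc _
    simp only [hcnLoopA]
    constructor
    · intro h; exact absurd h (by simp)
    · rintro (⟨f, hf1, _, hmem⟩ | ⟨n, hn, _⟩)
      · exact absurd (hmem 1 (le_refl 1) hf1) (by simp)
      · exact absurd hn (by simp)
  | cons x r ih =>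
    intro prev c hc hp
    have hpx : prev < x := (List.pairwise_cons.mp hp).1 x (by simp)
    have hpr : List.Pairwise (· < ·) (x :: r) := (List.pairwise_cons.mp hp).2
    have hxr : ∀ y ∈ r, x < y := (List.pairwise_cons.mp hpr).1
    by_cases hx : x = prev + 1
    · subst hx
      simp only [hcnLoopA, if_true]
      by_cases hfire : c + 1 ≥ maxc
      · rw [if_pos hfire]
        constructor
        · intro _
          exact Or.inl ⟨1, le_refl 1, by omega, by intro i h1 h2; have : i = 1 := by omega
                                                   subst this; simp⟩
        · intro _; rfl
      · rw [if_neg hfire]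
        rw [ih (prev + 1) (c + 1) (by omega) hpr]
        constructor
        · rintro (⟨f, hf1, hfm, hmem⟩ | hr)
          · refine Or.inl ⟨f + 1, by omega, by omega, ?_⟩
            intro i h1 hi
            rcases eq_or_lt_of_le h1 with rfl | h2
            · simp
            · have : prev + i = prev + 1 + (i - 1) := by ring
              rw [this]
              exact List.mem_cons_of_mem _ (hmem (i - 1) (by omega) (by omega))
          · exact Or.inr (hasRun_mono (fun y hy => List.mem_cons_of_mem _ hy) hr)
        · rintro (⟨f, hf1, hfm, hmem⟩ | ⟨n, hn, hrun⟩)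
          · -- maxc > c+1 forces f ≥ 2; drop the first step
            have hf2 : 2 ≤ f := by omega
            refine Or.inl ⟨f - 1, by omega, by omega, ?_⟩
            intro i h1 hi
            have := hmem (i + 1) (by omega) (by omega)
            have hne : prev + (i + 1) ≠ prev + 1 := by omega
            have : prev + (i + 1) ∈ r := by
              rcases List.mem_cons.mp this with h | h
              · exact absurd h hne
              · exact h
            have heq : prev + 1 + i = prev + (i + 1) := by ring
            rw [heq]; exact this
          · rcases List.mem_cons.mp hn with heq | hnr
            · -- the run starts at prev+1: it feeds the counter
              refine Or.inl ⟨max maxc 2 - 1, by omega, by omega, ?_⟩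
              intro i h1 hi
              have hm2 := hrun i (by omega) (by omega)
              rw [heq] at hm2
              have hne : prev + 1 + i ≠ prev + 1 := by omega
              rcases List.mem_cons.mp hm2 with h | h
              · exact absurd h hne
              · exact h
            · -- the run lies wholly beyond prev+1
              refine Or.inr ⟨n, hnr, fun k h0 hk => ?_⟩
              have hm2 := hrun k h0 hk
              have hxn : prev + 1 < n := hxr n hnr
              have hne : n + k ≠ prev + 1 := by omega
              rcases List.mem_cons.mp hm2 with h | h
              · exact absurd h hne
              · exact h
    · simp only [hcnLoopA, if_neg hx]
      rw [ih x 1 (le_refl 1) hpr]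
      constructor
      · rintro (⟨f, hf1, hfm, hmem⟩ | hr)
        · -- a run starting at x of length 1+f ≥ max maxc 2
          refine Or.inr ⟨x, by simp, fun k h0 hk => ?_⟩
          rcases eq_or_lt_of_le h0 with rfl | hpos
          · simp
          · exact List.mem_cons_of_mem _ (hmem k (by omega) (by omega))
        · exact Or.inr (hasRun_mono (fun y hy => List.mem_cons_of_mem _ hy) hr)
      · rintro (⟨f, hf1, hfm, hmem⟩ | ⟨n, hn, hrun⟩)
        · -- impossible: prev+1 would have to be in x :: r, but prev < x and r > x
          exfalso
          have := hmem 1 (le_refl 1) hf1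
          rcases List.mem_cons.mp this with h | h
          · omega
          · have := hxr _ h; omega
        · rcases List.mem_cons.mp hn with heq | hnr
          · refine Or.inl ⟨max maxc 2 - 1, by omega, by omega, ?_⟩
            intro i h1 hi
            have hm2 := hrun i (by omega) (by omega)
            rw [heq] at hm2
            have hne : x + i ≠ x := by omega
            rcases List.mem_cons.mp hm2 with h | h
            · exact absurd h hne
            · exact h
          · refine Or.inr ⟨n, hnr, fun k h0 hk => ?_⟩
            have hm2 := hrun k h0 hk
            have hxn : x < n := hxr n hnr
            have hne : n + k ≠ x := by omega
            rcases List.mem_cons.mp hm2 with h | h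
            · exact absurd h hne
            · exact h

theorem A_char (numbers : List Int) (maxc : Int) (hnd : numbers.Nodup) :
    (has_consecutive_numbers numbers maxc = true ↔ HasRun numbers (max maxc 2)) := by
  unfold has_consecutive_numbers
  have hperm : (PySem.List.sorted numbers (fun x => x) false).Perm numbers :=
    PySem.List.sorted_perm numbers (fun x => x) false
  have hmemiff : ∀ x : Int, x ∈ PySem.List.sorted numbers (fun x => x) false ↔ x ∈ numbers :=
    fun x => hperm.mem_iff
  have hrun_iff : HasRun (PySem.List.sorted numbers (fun x => x) false) (max maxc 2) ↔
      HasRun numbers (max maxc 2) := by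
    constructor
    · exact hasRun_mono (fun x hx => (hmemiff x).mp hx)
    · exact hasRun_mono (fun x hx => (hmemiff x).mpr hx)
  have hsnd : (PySem.List.sorted numbers (fun x => x) false).Nodup := hperm.nodup_iff.mpr hnd
  have hsle : (PySem.List.sorted numbers (fun x => x) false).Pairwise (· ≤ ·) := by
    have := PySem.List.sorted_pairwise numbers (fun x => x)
    simpa using this
  have hslt : (PySem.List.sorted numbers (fun x => x) false).Pairwise (· < ·) := by
    have hand := hsle.and (List.nodup_iff_pairwise_ne.mp hsnd)
    exact hand.imp (fun h => lt_of_le_of_ne h.1 h.2)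
  rw [← hrun_iff]
  cases hs : PySem.List.sorted numbers (fun x => x) false with
  | nil =>
    simp only
    constructor
    · intro h; exact absurd h (by simp)
    · rintro ⟨n, hn, _⟩; exact absurd hn (by simp)
  | cons h t =>
    rw [hs] at hslt
    have hht : ∀ y ∈ t, h < y := (List.pairwise_cons.mp hslt).1
    rw [loopA_iff maxc t h 1 (le_refl 1) hslt]
    constructor
    · rintro (⟨f, hf1, hfm, hmem⟩ | hr)
      · refine ⟨h, by simp, fun k h0 hk => ?_⟩
        rcases eq_or_lt_of_le h0 with rfl | hpos
        · simp
        · exact List.mem_cons_of_mem _ (hmem k (by omega) (by omega))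
      · exact hasRun_mono (fun y hy => List.mem_cons_of_mem _ hy) hr
    · rintro ⟨n, hn, hrun⟩
      rcases List.mem_cons.mp hn with heq | hnt
      · refine Or.inl ⟨max maxc 2 - 1, by omega, by omega, ?_⟩
        intro i h1 hi
        have hm2 := hrun i (by omega) (by omega)
        rw [heq] at hm2
        have hne : h + i ≠ h := by omega
        rcases List.mem_cons.mp hm2 with hmm | hmm
        · exact absurd hmm hne
        · exact hmm
      · refine Or.inr ⟨n, hnt, fun k h0 hk => ?_⟩
        have hm2 := hrun k h0 hk
        have hxn : h < n := hht n hnt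
        have hne : n + k ≠ h := by omega
        rcases List.mem_cons.mp hm2 with hmm | hmm
        · exact absurd hmm hne
        · exact hmm

-- ===== VERDICT (by name: the statements are the Claim_ definitions above) =====
theorem has_consecutive_numbers_spec : Claim_unchanged_has_consecutive_numbers := by
  intro numbers maxc _ hpre hnD
  have hA := A_char numbers maxc hpre
  have hB := B_char numbers maxc hpre hnD
  cases hb : has_consecutive_numbers_alt numbers maxc with
  | true => exact hA.mpr (hB.mp hb)
  | false =>
    cases ha : has_consecutive_numbers numbers maxc with
    | false => rfl
    | true =>
      rw [← hb]
      exact (hB.mpr (hA.mp ha)).symm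

theorem has_consecutive_numbers_changed : Claim_changed_has_consecutive_numbers := by
  unfold Claim_changed_has_consecutive_numbers; decide

theorem has_consecutive_numbers_tight : Claim_exact_has_consecutive_numbers := by
  intro numbers maxc _ hpre hD
  obtain ⟨hm1, hne, hnopair⟩ := hD
  -- A is false: a true A would yield two adjacent members
  have hA : has_consecutive_numbers numbers maxc = false := by
    cases ha : has_consecutive_numbers numbers maxc with
    | false => rfl
    | true =>
      exfalso
      obtain ⟨n, hn, hrun⟩ := (A_char numbers maxc hpre).mp ha
      have h0 := hrun 0 (le_refl 0) (by omega)
      have h1 := hrun 1 (by omega) (by omega)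
      simp only [add_zero] at h0
      exact hnopair n h0 h1
  -- B is true: the minimal element of any run is a start, and length 1 ≥ maxc
  have hB : has_consecutive_numbers_alt numbers maxc = true := by
    obtain ⟨n₀, hn₀⟩ := List.exists_mem_of_ne_nil numbers hne
    have hn₀p : n₀ ∈ PySem.Set.ofList numbers := (PySem.Set.mem_ofList numbers n₀).mpr hn₀
    obtain ⟨st, hst, hst1, _, _⟩ :=
      exists_start _ (PySem.Set.nodup_ofList numbers) n₀ hn₀p
    unfold has_consecutive_numbers_alt
    simp only [List.any_eq_true, Bool.and_eq_true, Bool.not_eq_true', decide_eq_true_eq]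
    exact ⟨st, hst, by simpa using hst1,
      le_trans hm1 (runLen_ge _ st (PySem.Set.ofList numbers).length 1)⟩
  rw [hA, hB]
  simp
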